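-- pv_equiv track=rewrite | github.com/azanbinzahid/google-kickstart-2022 | RoundC/p1.py | solve
-- ===== SOURCE A (Python) =====
-- def solve(old_pass):
--     new_pass = old_pass
--
--     if not any([s.islower() for s in old_pass]):
--         new_pass += 'a'
--
--     if not any([s.isupper() for s in old_pass]):
--         new_pass += 'A'
--
--     if not any([s.isdigit() for s in old_pass]):
--         new_pass += '1'
--
--
--     if not any([s in ['#', '@', '*', '&'] for s in old_pass]):
--         new_pass += '#'
--
--
--     if len(new_pass) < 7:
--         new_pass += '@' * (7 - len(new_pass))
--
--     return new_pass
-- ===== SOURCE B (Python) =====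
-- def solve(old_pass):
--     # Worklist algorithm: start with the ordered list of (predicate, filler)
--     # requirements and consume the password, deleting every requirement the
--     # current character satisfies; stop early once the worklist is empty.
--     # The survivors' fillers (still in a,A,1,# order, since filtering
--     # preserves order) are appended, then pad to length 7.
--     pending = [(str.islower, 'a'),
--                (str.isupper, 'A'),
--                (str.isdigit, '1'),
--                (lambda c: c in '#@*&', '#')]
--     i = 0
--     while pending and i < len(old_pass):
--         ch = old_pass[i]
--         pending = [(p, f) for (p, f) in pending if not p(ch)]
--         i += 1
--     out = old_pass + ''.join(f for _, f in pending)
--     return out + '@' * (7 - len(out)) if len(out) < 7 else out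
-- ===== Notes on version B (the rewrite author's own statement) =====
-- stated objective: alternative
-- what changed: B replaces A's four independent any()-scans and conditional appends with a worklist algorithm: it starts from an ordered list of (predicate, filler) requirements, consumes the password deleting satisfied requirements with early exit when the worklist empties, and appends the surviving fillers before padding.
import Mathlib
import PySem

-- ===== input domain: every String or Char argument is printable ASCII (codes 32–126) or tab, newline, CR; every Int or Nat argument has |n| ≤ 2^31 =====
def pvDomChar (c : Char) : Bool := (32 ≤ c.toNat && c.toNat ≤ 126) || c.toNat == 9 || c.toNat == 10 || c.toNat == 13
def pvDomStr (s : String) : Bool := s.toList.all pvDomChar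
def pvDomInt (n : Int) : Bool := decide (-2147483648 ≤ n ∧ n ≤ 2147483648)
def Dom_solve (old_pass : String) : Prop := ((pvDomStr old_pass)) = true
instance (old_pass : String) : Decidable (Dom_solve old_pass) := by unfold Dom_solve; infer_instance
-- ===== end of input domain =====

-- B replaces A's four any()-scans with a worklist of (predicate, filler) requirements
-- pruned while consuming the password (early exit when the worklist empties); same output.

-- ===== PORT A =====
def solve (old_pass : String) : String :=
  let cs := old_pass.toList
  let np := cs
  let np := if !(cs.any (fun s => PySem.Chars.islower s)) then np ++ ['a'] else np
  let np := if !(cs.any (fun s => PySem.Chars.isupper s)) then np ++ ['A'] else np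
  let np := if !(cs.any (fun s => PySem.Chars.isdigit s)) then np ++ ['1'] else np
  let np := if !(cs.any (fun s => ['#', '@', '*', '&'].contains s)) then np ++ ['#'] else np
  let np := if np.length < 7 then np ++ List.replicate (7 - np.length) '@' else np
  String.ofList np

-- ===== PORT B =====
-- the ordered worklist of (predicate, filler) requirements
def pwReqs : List ((Char → Bool) × Char) :=
  [(fun c => PySem.Chars.islower c, 'a'),
   (fun c => PySem.Chars.isupper c, 'A'),
   (fun c => PySem.Chars.isdigit c, '1'),
   (fun c => "#@*&".toList.contains c, '#')]

-- the worklist loop of Source B: walk the password, deleting satisfied requirements; early exit on []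
def pwPrune : List Char → List ((Char → Bool) × Char) → List ((Char → Bool) × Char)
  | _, [] => []
  | [], pending => pending
  | c :: cs, pending => pwPrune cs (pending.filter (fun pf => !pf.1 c))

def solve_alt (old_pass : String) : String :=
  let pending := pwPrune old_pass.toList pwReqs
  let out := old_pass.toList ++ pending.map Prod.snd
  if out.length < 7 then String.ofList (out ++ List.replicate (7 - out.length) '@')
  else String.ofList out

-- ===== PRECONDITION & SPEC =====
def Spec_solve (old_pass : String) (out : String) : Prop := out = solve_alt old_pass
instance (old_pass : String) (out : String) : Decidable (Spec_solve old_pass out) := by unfold Spec_solve; infer_instance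

-- ===== CLAIM =====
def Claim_equal_solve : Prop := ∀ (old_pass : String), Dom_solve old_pass → Spec_solve old_pass (solve old_pass)

-- ===== LEMMAS AND PROOFS =====

/-- The worklist recursion computes a filter by "no character satisfies the predicate". -/
theorem pwPrune_eq_filter (cs : List Char) (pending : List ((Char → Bool) × Char)) :
    pwPrune cs pending = pending.filter (fun pf => !(cs.any (fun c => pf.1 c))) := by
  induction cs generalizing pending with
  | nil => cases pending <;> simp [pwPrune]
  | cons c cs ih =>
    cases pending with
    | nil => rfl
    | cons p ps =>
      show pwPrune cs ((p :: ps).filter (fun pf => !pf.1 c)) = _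
      rw [ih, List.filter_filter]
      congr 1
      funext pf
      simp [Bool.and_comm]

theorem contains_symbols (s : Char) :
    ("#@*&".toList.contains s) = (['#', '@', '*', '&'].contains s) := rfl

theorem solve_eq_alt (old_pass : String) : solve old_pass = solve_alt old_pass := by
  unfold solve solve_alt
  rw [pwPrune_eq_filter]
  simp only [pwReqs, List.filter_cons, List.filter_nil, contains_symbols]
  split_ifs <;>
    simp only [List.map_cons, List.map_nil, List.length_append, List.length_cons,
      List.length_nil, List.append_assoc, List.cons_append, List.nil_append] at * <;>
    first | rfl | omega | simp

-- ===== VERDICT =====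
theorem solve_spec : Claim_equal_solve := by
  intro s _
  unfold Spec_solve
  exact solve_eq_alt s
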